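-- pv_equiv track=rewrite | github.com/agirunner/agirunner-platform | tests/live/lib/seed_live_test_environment_chunk01.py | model_supports_native_search
-- ===== SOURCE A (Python) =====
-- NATIVE_SEARCH_MODEL_PREFIXES: dict[str, tuple[str, ...]] = {
--     "openai": (
--         "gpt-5.4-pro",
--         "gpt-5.4",
--         "gpt-5.4-mini",
--         "gpt-5.4-nano",
--         "gpt-5.3-codex",
--         "gpt-5.2",
--         "gpt-5.2-pro",
--         "gpt-5.2-codex",
--         "gpt-5.1-codex-max",
--         "gpt-5.1-codex",
--         "gpt-5.1",
--         "gpt-5-pro",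
--         "gpt-5",
--         "gpt-5-codex",
--         "gpt-5-mini",
--         "gpt-5-nano",
--         "gpt-5-codex-mini",
--         "o4-mini",
--         "o3",
--         "o3-pro",
--         "o3-mini",
--         "o1",
--         "o1-pro",
--     ),
--     "anthropic": (
--         "claude-opus-4-6",
--         "claude-sonnet-4-6",
--         "claude-opus-4-1",
--         "claude-sonnet-4",
--         "claude-opus-4",
--         "claude-3-5-haiku",
--     ),
--     "google": (
--         "gemini-3.1-pro-preview",
--         "gemini-3-pro-preview",
--         "gemini-3-flash-preview",
--         "gemini-3.1-flash-lite-preview",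
--         "gemini-2.5-pro",
--         "gemini-2.5-flash",
--         "gemini-2.0-flash",
--     ),
--     "gemini": (
--         "gemini-3.1-pro-preview",
--         "gemini-3-pro-preview",
--         "gemini-3-flash-preview",
--         "gemini-3.1-flash-lite-preview",
--         "gemini-2.5-pro",
--         "gemini-2.5-flash",
--         "gemini-2.0-flash",
--     ),
-- }
--
-- def model_supports_native_search(provider_type: str | None, model_id: str | None) -> bool:
--     normalized_provider = (provider_type or "").strip().lower()
--     normalized_model = (model_id or "").strip()
--     if not normalized_provider or not normalized_model:
--         return False
--
--     for prefix in NATIVE_SEARCH_MODEL_PREFIXES.get(normalized_provider, ()):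
--         if normalized_model == prefix or normalized_model.startswith(f"{prefix}-"):
--             return True
--     return False
-- ===== SOURCE B (Python) =====
-- NATIVE_SEARCH_MODEL_PREFIXES: dict[str, tuple[str, ...]] = {
--     "openai": (
--         "gpt-5.4-pro", "gpt-5.4", "gpt-5.4-mini", "gpt-5.4-nano",
--         "gpt-5.3-codex", "gpt-5.2", "gpt-5.2-pro", "gpt-5.2-codex",
--         "gpt-5.1-codex-max", "gpt-5.1-codex", "gpt-5.1", "gpt-5-pro",
--         "gpt-5", "gpt-5-codex", "gpt-5-mini", "gpt-5-nano",
--         "gpt-5-codex-mini", "o4-mini", "o3", "o3-pro", "o3-mini",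
--         "o1", "o1-pro",
--     ),
--     "anthropic": (
--         "claude-opus-4-6", "claude-sonnet-4-6", "claude-opus-4-1",
--         "claude-sonnet-4", "claude-opus-4", "claude-3-5-haiku",
--     ),
--     "google": (
--         "gemini-3.1-pro-preview", "gemini-3-pro-preview",
--         "gemini-3-flash-preview", "gemini-3.1-flash-lite-preview",
--         "gemini-2.5-pro", "gemini-2.5-flash", "gemini-2.0-flash",
--     ),
--     "gemini": (
--         "gemini-3.1-pro-preview", "gemini-3-pro-preview",
--         "gemini-3-flash-preview", "gemini-3.1-flash-lite-preview",
--         "gemini-2.5-pro", "gemini-2.5-flash", "gemini-2.0-flash",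
--     ),
-- }
--
--
-- def model_supports_native_search(provider_type, model_id):
--     provider = (provider_type or "").strip().lower()
--     model = (model_id or "").strip()
--     if not provider or not model:
--         return False
--     prefixes = set(NATIVE_SEARCH_MODEL_PREFIXES.get(provider, ()))
--     # Scan the model once: a listed prefix matches iff some '-'-boundary
--     # prefix of the model (or the whole model) is in the set.
--     candidate = ""
--     for ch in model:
--         if ch == "-" and candidate in prefixes:
--             return True
--         candidate += ch
--     return candidate in prefixes
-- ===== Notes on version B (the rewrite author's own statement) =====
-- stated objective: alternative
-- what changed: A loops over the provider's prefix table testing equality or startswith(prefix+'-') on the model; B builds a set of the table once and makes a single left-to-right scan of the model, looking up each '-'-boundary prefix (and the full model) in the set.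
import Mathlib
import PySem

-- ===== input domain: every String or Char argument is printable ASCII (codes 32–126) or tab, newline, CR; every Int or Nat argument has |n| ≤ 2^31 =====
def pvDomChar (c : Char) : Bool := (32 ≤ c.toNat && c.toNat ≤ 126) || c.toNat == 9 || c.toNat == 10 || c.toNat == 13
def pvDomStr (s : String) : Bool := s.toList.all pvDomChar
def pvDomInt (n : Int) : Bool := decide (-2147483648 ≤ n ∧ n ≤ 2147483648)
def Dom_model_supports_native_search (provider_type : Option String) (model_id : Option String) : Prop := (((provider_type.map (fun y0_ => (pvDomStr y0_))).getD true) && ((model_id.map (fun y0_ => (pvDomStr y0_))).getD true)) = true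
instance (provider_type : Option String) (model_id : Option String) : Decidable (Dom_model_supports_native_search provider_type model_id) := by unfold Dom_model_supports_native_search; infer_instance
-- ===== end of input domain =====

-- B replaces A's "for each listed prefix, does the model start with it" table scan by one
-- left-to-right scan of the model that looks up each '-'-boundary prefix in a set (objective: alternative).

-- ===== PORT A =====
-- the module constant NATIVE_SEARCH_MODEL_PREFIXES (tuples ported as lists)
def NATIVE_SEARCH_MODEL_PREFIXES : PySem.Dict String (List String) :=
  PySem.Dict.ofList
    [ ("openai",
        [ "gpt-5.4-pro", "gpt-5.4", "gpt-5.4-mini", "gpt-5.4-nano",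
          "gpt-5.3-codex", "gpt-5.2", "gpt-5.2-pro", "gpt-5.2-codex",
          "gpt-5.1-codex-max", "gpt-5.1-codex", "gpt-5.1", "gpt-5-pro",
          "gpt-5", "gpt-5-codex", "gpt-5-mini", "gpt-5-nano",
          "gpt-5-codex-mini", "o4-mini", "o3", "o3-pro", "o3-mini",
          "o1", "o1-pro" ]),
      ("anthropic",
        [ "claude-opus-4-6", "claude-sonnet-4-6", "claude-opus-4-1",
          "claude-sonnet-4", "claude-opus-4", "claude-3-5-haiku" ]),
      ("google",
        [ "gemini-3.1-pro-preview", "gemini-3-pro-preview",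
          "gemini-3-flash-preview", "gemini-3.1-flash-lite-preview",
          "gemini-2.5-pro", "gemini-2.5-flash", "gemini-2.0-flash" ]),
      ("gemini",
        [ "gemini-3.1-pro-preview", "gemini-3-pro-preview",
          "gemini-3-flash-preview", "gemini-3.1-flash-lite-preview",
          "gemini-2.5-pro", "gemini-2.5-flash", "gemini-2.0-flash" ]) ]

def model_supports_native_search (provider_type : Option String) (model_id : Option String) : Bool :=
  let normalized_provider := PySem.Str.lower (PySem.Str.strip (provider_type.getD ""))
  let normalized_model := PySem.Str.strip (model_id.getD "")
  if normalized_provider == "" || normalized_model == "" then false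
  else
    (NATIVE_SEARCH_MODEL_PREFIXES.getD normalized_provider []).any
      (fun pre => normalized_model == pre || PySem.Str.startswith normalized_model (pre ++ "-"))

-- ===== PORT B =====
-- the 'for ch in model' loop of Source B: candidate is the part of the model already scanned
def nsScan (prefixes : PySem.Set String) (candidate : List Char) (rest : List Char) : Bool :=
  match rest with
  | [] => prefixes.contains (String.ofList candidate)
  | c :: cs =>
      if c == '-' && prefixes.contains (String.ofList candidate) then true
      else nsScan prefixes (candidate ++ [c]) cs

def model_supports_native_search_alt (provider_type : Option String) (model_id : Option String) : Bool :=
  let provider := PySem.Str.lower (PySem.Str.strip (provider_type.getD ""))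
  let model := PySem.Str.strip (model_id.getD "")
  if provider == "" || model == "" then false
  else
    let prefixes : PySem.Set String := PySem.Set.ofList (NATIVE_SEARCH_MODEL_PREFIXES.getD provider [])
    nsScan prefixes [] model.toList

-- ===== PRECONDITION & SPEC =====
def Spec_model_supports_native_search (provider_type : Option String) (model_id : Option String) (out : Bool) : Prop := out = model_supports_native_search_alt provider_type model_id
instance (provider_type : Option String) (model_id : Option String) (out : Bool) : Decidable (Spec_model_supports_native_search provider_type model_id out) := by unfold Spec_model_supports_native_search; infer_instance

-- ===== CLAIM (what is proved, stated in full; the proofs are below) =====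
def Claim_equal_model_supports_native_search : Prop := ∀ (provider_type : Option String) (model_id : Option String), Dom_model_supports_native_search provider_type model_id → Spec_model_supports_native_search provider_type model_id (model_supports_native_search provider_type model_id)

-- ===== LEMMAS AND PROOFS =====

-- nsScan succeeds iff the whole word scanned so far, or some prefix of it ending
-- at a '-' inside the unscanned part, is in the set.
theorem nsScan_iff (S : PySem.Set String) (acc rest : List Char) :
    nsScan S acc rest = true ↔
      (String.ofList (acc ++ rest) ∈ S ∨
        ∃ i, ∃ _ : i < rest.length, rest[i] = '-' ∧ String.ofList (acc ++ rest.take i) ∈ S) := by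
  induction rest generalizing acc with
  | nil =>
      simp [nsScan, PySem.Set.contains]
  | cons c cs ih =>
      rw [nsScan]
      by_cases h : c = '-' ∧ String.ofList acc ∈ S
      · constructor
        · intro _
          exact Or.inr ⟨0, by simp, by simpa using h.1, by simpa using h.2⟩
        · intro _
          simp [h.1, PySem.Set.contains, h.2]
      · have hcond : (c == '-' && S.contains (String.ofList acc)) = false := by
          rcases not_and_or.mp h with h1 | h1
          · simp [h1]
          · simp [PySem.Set.contains, h1]
        rw [hcond, if_neg (by simp)]
        rw [ih]
        constructor
        · rintro (hm | ⟨i, hi, hc, hmem⟩)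
          · exact Or.inl (by simpa using hm)
          · exact Or.inr ⟨i + 1, by simpa using hi, by simpa using hc, by simpa using hmem⟩
        · rintro (hm | ⟨i, hi, hc, hmem⟩)
          · exact Or.inl (by simpa using hm)
          · match i with
            | 0 =>
                exfalso
                exact h ⟨by simpa using hc, by simpa using hmem⟩
            | (j+1) =>
                exact Or.inr ⟨j, by simpa using hi, by simpa using hc, by simpa using hmem⟩

-- A's per-prefix test (equality or prefix-then-'-') picks out exactly the '-'-boundary prefixes of m.
theorem boundary_bridge (ps : List String) (m : List Char) :
    (∃ p ∈ ps, m = p.toList ∨ p.toList ++ ['-'] <+: m) ↔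
      (String.ofList m ∈ ps ∨
        ∃ i, ∃ _ : i < m.length, m[i] = '-' ∧ String.ofList (m.take i) ∈ ps) := by
  constructor
  · rintro ⟨p, hp, heq | ⟨t, ht⟩⟩
    · exact Or.inl (by simpa [heq] using hp)
    · subst ht
      refine Or.inr ⟨p.toList.length, ⟨by simp, ?_, ?_⟩⟩
      · simp
      · have h2 : (p.toList ++ ['-'] ++ t).take p.toList.length = p.toList := by
          rw [List.append_assoc, List.take_left]
        rw [h2]
        simpa using hp
  · rintro (hm | ⟨i, hi, hc, hmem⟩)
    · exact ⟨String.ofList m, hm, Or.inl (by simp)⟩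
    · refine ⟨String.ofList (m.take i), hmem, Or.inr ⟨m.drop (i + 1), ?_⟩⟩
      have hdrop : m.drop i = m[i] :: m.drop (i + 1) := List.drop_eq_getElem_cons hi
      calc (String.ofList (m.take i)).toList ++ ['-'] ++ m.drop (i + 1)
          = m.take i ++ (m[i] :: m.drop (i + 1)) := by simp [hc]
        _ = m.take i ++ m.drop i := by rw [hdrop]
        _ = m := List.take_append_drop i m

-- the two loops agree for every prefix table and every model string
theorem loop_eq (ps : List String) (m : String) :
    (ps.any fun pre => m == pre || PySem.Str.startswith m (pre ++ "-"))
      = nsScan (PySem.Set.ofList ps) [] m.toList := by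
  rw [Bool.eq_iff_iff]
  rw [nsScan_iff]
  simp only [List.nil_append, PySem.Set.mem_ofList]
  rw [← boundary_bridge ps m.toList]
  constructor
  · intro h
    obtain ⟨p, hp, hcond⟩ := List.any_eq_true.mp h
    refine ⟨p, hp, ?_⟩
    by_cases hmp : m = p
    · exact Or.inl (by simp [hmp])
    · have h1 : PySem.Str.startswith m (p ++ "-") = true := by
        simpa [hmp] using hcond
      have h2 := (PySem.Chars.startswith_iff _ _).mp (by simpa using h1)
      exact Or.inr (by simpa using h2)
  · rintro ⟨p, hp, hcond⟩
    apply List.any_eq_true.mpr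
    refine ⟨p, hp, ?_⟩
    rcases hcond with h1 | h1
    · have hmp : m = p := by simpa [String.ext_iff] using h1
      simp [hmp]
    · have h2 : PySem.Chars.startswith m.toList (p.toList ++ ['-']) = true :=
        (PySem.Chars.startswith_iff _ _).mpr h1
      simp [h2]

-- ===== VERDICT (by name: the statement is the Claim_ definition above) =====
theorem model_supports_native_search_spec : Claim_equal_model_supports_native_search := by
  intro provider_type model_id _
  unfold Spec_model_supports_native_search
  unfold model_supports_native_search model_supports_native_search_alt
  simp only []
  split
  · rfl
  · exact loop_eq _ _
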